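-- pv_equiv track=rewrite | github.com/rezeile/cp3 | reformat.py | parseHeadingId
-- ===== SOURCE A (Python) =====
-- def parseHeadingId(line):
--   hd = ""
--   for c in line:
--     if c == '\t' or c == ' ':
--       continue
--     elif c != '.':
--       hd += c
--     else:
--       break
--   return hd
-- ===== SOURCE B (Python) =====
-- def parseHeadingId(line):
--     i = line.find('.')
--     head = line if i == -1 else line[:i]
--     return ''.join(c for c in head if c != ' ' and c != '\t')
-- ===== Notes on version B (the rewrite author's own statement) =====
-- stated objective: idiomatic
-- what changed: A's single accumulate-skip-and-break character loop is replaced by locating the first dot with str.find, slicing the prefix before it, and filtering out spaces and tabs with a join-comprehension.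
import Mathlib
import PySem

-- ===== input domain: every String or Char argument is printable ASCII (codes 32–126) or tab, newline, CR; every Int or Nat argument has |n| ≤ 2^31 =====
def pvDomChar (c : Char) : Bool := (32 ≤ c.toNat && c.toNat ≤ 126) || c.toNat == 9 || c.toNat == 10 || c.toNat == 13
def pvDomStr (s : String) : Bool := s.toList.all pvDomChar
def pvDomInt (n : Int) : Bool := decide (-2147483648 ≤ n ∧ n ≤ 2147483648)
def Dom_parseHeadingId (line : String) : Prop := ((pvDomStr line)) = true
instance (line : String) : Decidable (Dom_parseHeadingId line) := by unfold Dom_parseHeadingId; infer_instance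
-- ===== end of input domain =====

-- B replaces A's accumulate-skip-and-break loop by find-the-dot, slice the prefix, filter out ' '/'\t' (objective: idiomatic; same cost).

-- ===== PORT A =====
-- for c in line: skip '\t'/' ', append if c != '.', else break
def pvLoopA : List Char → List Char → List Char
  | hd, [] => hd
  | hd, c :: rest =>
    if c = '\t' ∨ c = ' ' then pvLoopA hd rest
    else if c ≠ '.' then pvLoopA (hd ++ [c]) rest
    else hd

def parseHeadingId (line : String) : String := String.ofList (pvLoopA [] line.toList)

-- ===== PORT B =====
-- i = line.find('.'); head = line if i == -1 else line[:i]; join of the comprehension keeping c != ' ' and c != '\t'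
def parseHeadingId_alt (line : String) : String :=
  let i := PySem.Str.find line "."
  let head := if i = -1 then line else String.ofList (PySem.List.slice line.toList none (some i))
  String.ofList (head.toList.filter (fun c => c != ' ' && c != '\t'))

-- ===== PRECONDITION & SPEC =====
def Spec_parseHeadingId (line : String) (out : String) : Prop := out = parseHeadingId_alt line
instance (line : String) (out : String) : Decidable (Spec_parseHeadingId line out) := by unfold Spec_parseHeadingId; infer_instance

-- ===== CLAIM (what is proved, stated in full; the proofs are below) =====
def Claim_equal_parseHeadingId : Prop := ∀ (line : String), Dom_parseHeadingId line → Spec_parseHeadingId line (parseHeadingId line)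

-- ===== LEMMAS AND PROOFS =====

theorem pvLoopA_eq (l : List Char) : ∀ hd, pvLoopA hd l =
    hd ++ (l.takeWhile (fun c => c != '.')).filter (fun c => c != ' ' && c != '\t') := by
  induction l with
  | nil => intro hd; simp [pvLoopA]
  | cons c rest ih =>
    intro hd
    by_cases hws : c = '\t' ∨ c = ' '
    · have hdot : (c != '.') = true := by
        rcases hws with h | h <;> subst h <;> decide
      have hflt : (c != ' ' && c != '\t') = false := by
        rcases hws with h | h <;> subst h <;> decide
      simp [pvLoopA, hws, hdot, hflt, ih]
    · by_cases hd' : c = '.'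
      · subst hd'
        simp [pvLoopA]
      · have hdot : (c != '.') = true := by simpa using hd'
        have hflt : (c != ' ' && c != '\t') = true := by
          rw [not_or] at hws
          simp [hws.1, hws.2]
        simp [pvLoopA, hws, hd', hdot, hflt, ih]

theorem singleton_prefix_iff (c : Char) (l : List Char) : [c] <+: l ↔ l.head? = some c := by
  cases l with
  | nil => simp
  | cons a t =>
    constructor
    · rintro ⟨u, hu⟩
      simp at hu
      simp [hu.1]
    · intro h
      simp at h
      subst h
      exact ⟨t, rfl⟩

theorem take_eq_takeWhile (l : List Char) : ∀ (k : Nat), k ≤ l.length →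
    (∀ i, i < k → l[i]? ≠ some '.') → (k = l.length ∨ l[k]? = some '.') →
    l.takeWhile (fun c => c != '.') = l.take k := by
  induction l with
  | nil => intro k hk _ _; simp_all
  | cons c rest ih =>
    intro k hk hbefore hat
    cases k with
    | zero =>
      rcases hat with h | h
      · simp at h
      · simp at h
        subst h
        simp
    | succ k' =>
      have hc : c ≠ '.' := by
        have := hbefore 0 (Nat.succ_pos _)
        simpa using this
      have hdot : (c != '.') = true := by simpa using hc
      have : rest.takeWhile (fun c => c != '.') = rest.take k' := by
        apply ih k' (by simpa using hk)
        · intro i hi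
          have := hbefore (i + 1) (by omega)
          simpa using this
        · rcases hat with h | h
          · left; simpa using h
          · right; simpa using h
      simp [hdot, this, List.take_succ_cons]

theorem headB_eq (line : String) :
    (if PySem.Str.find line "." = -1 then line
     else String.ofList (PySem.List.slice line.toList none (some (PySem.Str.find line ".")))).toList
      = line.toList.takeWhile (fun c => c != '.') := by
  set l := line.toList with hl
  by_cases hfind : PySem.Str.find line "." = -1
  · have hnotin : ¬ ('.' ∈ l) := by
      have h := (PySem.Str.find_eq_neg_one_iff (s := line) (sub := ".")).mp hfind
      intro hmem
      apply h
      rcases List.mem_iff_append.mp hmem with ⟨s, t, hst⟩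
      exact ⟨s, t, by simpa using hst.symm⟩
    rw [if_pos hfind]
    rw [List.takeWhile_eq_self_iff.mpr]
    intro x hx
    have : x ≠ '.' := fun h => hnotin (h ▸ hx)
    simpa using this
  · have hfc : PySem.Chars.find l ['.'] ≠ -1 := by
      simpa [PySem.Str.find, hl] using hfind
    have hnonneg : 0 ≤ PySem.Chars.find l ['.'] := by
      have := PySem.Chars.neg_one_le_find (s := l) (sub := ['.'])
      omega
    obtain ⟨hpre, hmin⟩ := PySem.Chars.find_spec (s := l) (sub := ['.']) hnonneg
    set k := (PySem.Chars.find l ['.']).toNat with hk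
    have hatk : l[k]? = some '.' := by
      have := (singleton_prefix_iff '.' (l.drop k)).mp hpre
      rwa [List.head?_drop] at this
    have hklen : k < l.length := by
      rcases Nat.lt_or_ge k l.length with h | h
      · exact h
      · simp [List.getElem?_eq_none h] at hatk
    have hbefore : ∀ i, i < k → l[i]? ≠ some '.' := by
      intro i hi hcontra
      apply hmin i hi
      rw [singleton_prefix_iff, List.head?_drop]
      exact hcontra
    rw [if_neg hfind]
    have hslice : PySem.List.slice l none (some (PySem.Str.find line ".")) = l.take k := by
      have : PySem.Str.find line "." = ((k : Nat) : Int) := by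
        simp [PySem.Str.find, hl, hk]
        omega
      rw [this, PySem.List.slice_to_natCast]
    simp only [hslice]
    rw [take_eq_takeWhile l k (le_of_lt hklen) hbefore (Or.inr hatk)]
    exact String.toList_ofList

-- ===== VERDICT (by name: the statement is the Claim_ definition above) =====
theorem parseHeadingId_spec : Claim_equal_parseHeadingId := by
  intro line _
  unfold Spec_parseHeadingId parseHeadingId parseHeadingId_alt
  rw [pvLoopA_eq]
  simp only [List.nil_append]
  rw [headB_eq]
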